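-- pv_equiv track=rewrite | github.com/ScheepersR/PractiseProblems | advent_2023/advent14.py | shift_block
-- ===== SOURCE A (Python) =====
-- def shift_block(block):
--     shifted_block = []
--     for row in block:
--         shifted_row = []
--         current_section = [0, 0]
--         for rr in row:
--             if rr == "#":
--                 rocks = current_section[1]
--                 empties = current_section[0]
--                 shifted_row = shifted_row + ["O"] * rocks + ["."] * empties + ["#"]
--                 current_section = [0, 0]
--             elif rr == "O":
--                 current_section[1] += 1
--             else:
--                 current_section[0] += 1
--
--         rocks = current_section[1]
--         empties = current_section[0]
--         shifted_row = shifted_row + ["O"] * rocks + ["."] * empties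
--         shifted_block.append(shifted_row)
--
--     return shifted_block
-- ===== SOURCE B (Python) =====
-- def shift_block(block):
--     return [_join_segments([_fill(seg) for seg in _split(row)]) for row in block]
--
--
-- def _split(row):
--     # partition the row into maximal wall-free segments (the "#" walls are dropped)
--     if not row:
--         return [[]]
--     if row[0] == "#":
--         return [[]] + _split(row[1:])
--     rest = _split(row[1:])
--     return [[row[0]] + rest[0]] + rest[1:]
--
--
-- def _fill(seg):
--     # all rocks roll to the left end of the segment
--     rocks = seg.count("O")
--     return ["O"] * rocks + ["."] * (len(seg) - rocks)
--
--
-- def _join_segments(pieces):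
--     # put the walls back between the settled segments
--     if len(pieces) == 1:
--         return pieces[0]
--     return pieces[0] + ["#"] + _join_segments(pieces[1:])
-- ===== Notes on version B (the rewrite author's own statement) =====
-- stated objective: alternative
-- what changed: Replaces A's single accumulator scan carrying (empties, rocks) counters per row with a split-on-walls / fill-each-segment / rejoin decomposition.
import Mathlib
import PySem

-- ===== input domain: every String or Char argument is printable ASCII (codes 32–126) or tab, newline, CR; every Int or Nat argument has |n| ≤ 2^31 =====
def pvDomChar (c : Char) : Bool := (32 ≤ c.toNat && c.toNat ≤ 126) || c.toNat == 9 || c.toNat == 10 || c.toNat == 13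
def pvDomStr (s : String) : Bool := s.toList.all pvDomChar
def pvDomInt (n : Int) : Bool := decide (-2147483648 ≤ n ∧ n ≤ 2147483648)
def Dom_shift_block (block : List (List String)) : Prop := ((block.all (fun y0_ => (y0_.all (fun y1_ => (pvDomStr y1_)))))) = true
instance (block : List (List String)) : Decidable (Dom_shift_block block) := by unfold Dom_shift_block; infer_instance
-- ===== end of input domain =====

-- B replaces A's per-row accumulator scan (carrying empty/rock counters) with a
-- split-on-walls / fill-each-segment / rejoin decomposition (objective: alternative).

-- ===== PORT A =====
-- state: (shifted_row, empties, rocks) — A's shifted_row and current_section = [empties, rocks]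
def pvStepA (st : List String × Nat × Nat) (rr : String) : List String × Nat × Nat :=
  if rr = "#" then
    (st.1 ++ List.replicate st.2.2 "O" ++ List.replicate st.2.1 "." ++ ["#"], 0, 0)
  else if rr = "O" then (st.1, st.2.1, st.2.2 + 1)
  else (st.1, st.2.1 + 1, st.2.2)

def shift_block (block : List (List String)) : List (List String) :=
  block.map (fun row =>
    let st := row.foldl pvStepA ([], 0, 0)
    st.1 ++ List.replicate st.2.2 "O" ++ List.replicate st.2.1 ".")

-- ===== PORT B =====
-- _split: partition the row into maximal wall-free segments
def pvSplit : List String → List (List String)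
  | [] => [[]]
  | x :: xs =>
    if x = "#" then [] :: pvSplit xs
    else
      match pvSplit xs with
      | s :: rest => (x :: s) :: rest
      | [] => [[x]]   -- unreachable: pvSplit never returns []

-- _fill: all rocks roll to the left end of the segment
def pvFill (seg : List String) : List String :=
  List.replicate (seg.count "O") "O" ++ List.replicate (seg.length - seg.count "O") "."

-- _join_segments: put the walls back between the settled segments
def pvJoin : List (List String) → List String
  | [] => []          -- unreachable: pieces is never empty
  | [p] => p
  | p :: ps => p ++ ["#"] ++ pvJoin ps

def shift_block_alt (block : List (List String)) : List (List String) :=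
  block.map (fun row => pvJoin ((pvSplit row).map pvFill))

-- ===== PRECONDITION & SPEC =====
def Spec_shift_block (block : List (List String)) (out : List (List String)) : Prop := out = shift_block_alt block
instance (block : List (List String)) (out : List (List String)) : Decidable (Spec_shift_block block out) := by unfold Spec_shift_block; infer_instance

-- ===== CLAIM (what is proved, stated in full; the proofs are below) =====
def Claim_equal_shift_block : Prop := ∀ (block : List (List String)), Dom_shift_block block → Spec_shift_block block (shift_block block)

-- ===== LEMMAS AND PROOFS =====

-- segments processed with pending counters (e empties, r rocks) carried into the first segment
def gSeg (e r : Nat) : List (List String) → List String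
  | [] => List.replicate r "O" ++ List.replicate e "."   -- unreachable
  | [s] => List.replicate (r + s.count "O") "O" ++ List.replicate (e + (s.length - s.count "O")) "."
  | s :: s2 :: rest =>
      List.replicate (r + s.count "O") "O" ++ List.replicate (e + (s.length - s.count "O")) "."
        ++ ["#"] ++ gSeg 0 0 (s2 :: rest)

lemma pvSplit_ne_nil (row : List String) : pvSplit row ≠ [] := by
  cases row with
  | nil => simp [pvSplit]
  | cons x xs =>
    simp only [pvSplit]
    split
    · simp
    · cases h : pvSplit xs <;> simp

lemma join_eq_gSeg : ∀ (segs : List (List String)), segs ≠ [] →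
    pvJoin (segs.map pvFill) = gSeg 0 0 segs := by
  intro segs
  induction segs with
  | nil => intro h; exact absurd rfl h
  | cons s rest ih =>
    intro _
    cases rest with
    | nil => simp [pvJoin, gSeg, pvFill]
    | cons s2 rest2 =>
      have h2 : pvJoin (List.map pvFill (s :: s2 :: rest2))
          = pvFill s ++ ["#"] ++ pvJoin (List.map pvFill (s2 :: rest2)) := rfl
      rw [h2, ih (by simp)]
      simp [pvFill, gSeg, List.append_assoc]

lemma foldA_eq_gSeg : ∀ (row : List String) (sr : List String) (e r : Nat),
    (row.foldl pvStepA (sr, e, r)).1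
      ++ List.replicate (row.foldl pvStepA (sr, e, r)).2.2 "O"
      ++ List.replicate (row.foldl pvStepA (sr, e, r)).2.1 "."
    = sr ++ gSeg e r (pvSplit row) := by
  intro row
  induction row with
  | nil => intro sr e r; simp [pvSplit, gSeg]
  | cons x xs ih =>
    intro sr e r
    by_cases hx : x = "#"
    · have h1 : (x :: xs).foldl pvStepA (sr, e, r)
          = xs.foldl pvStepA (sr ++ List.replicate r "O" ++ List.replicate e "." ++ ["#"], 0, 0) := by
        simp [pvStepA, hx]
      rw [h1, ih]
      obtain ⟨s, rest, hs⟩ : ∃ s rest, pvSplit xs = s :: rest := by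
        cases h : pvSplit xs with
        | nil => exact absurd h (pvSplit_ne_nil xs)
        | cons a b => exact ⟨a, b, rfl⟩
      simp [pvSplit, hx, hs, gSeg, List.append_assoc]
    · obtain ⟨s, rest, hs⟩ : ∃ s rest, pvSplit xs = s :: rest := by
        cases h : pvSplit xs with
        | nil => exact absurd h (pvSplit_ne_nil xs)
        | cons a b => exact ⟨a, b, rfl⟩
      have hcle : s.count "O" ≤ s.length := List.count_le_length
      by_cases ho : x = "O"
      · have h1 : (x :: xs).foldl pvStepA (sr, e, r) = xs.foldl pvStepA (sr, e, r + 1) := by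
          simp [pvStepA, ho]
        rw [h1, ih]
        have hc : (x :: s).count "O" = s.count "O" + 1 := by simp [ho]
        have hl : (x :: s).length - (x :: s).count "O" = s.length - s.count "O" := by
          rw [List.length_cons, hc]; omega
        cases rest with
        | nil => simp [pvSplit, hs, ho, gSeg]; omega
        | cons a b =>
          simp [pvSplit, hs, ho, gSeg, List.append_assoc]
          omega
      · have h1 : (x :: xs).foldl pvStepA (sr, e, r) = xs.foldl pvStepA (sr, e + 1, r) := by
          simp [pvStepA, hx, ho]
        rw [h1, ih]
        have hc : (x :: s).count "O" = s.count "O" := by simp [ho]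
        have hl : (x :: s).length - (x :: s).count "O" = (s.length - s.count "O") + 1 := by
          rw [List.length_cons, hc]; omega
        cases rest with
        | nil => simp [pvSplit, hx, hs, gSeg, hc]; omega
        | cons a b =>
          simp [pvSplit, hx, hs, gSeg, hc, List.append_assoc]
          omega

lemma row_eq (row : List String) :
    (let st := row.foldl pvStepA ([], 0, 0)
     st.1 ++ List.replicate st.2.2 "O" ++ List.replicate st.2.1 ".")
    = pvJoin ((pvSplit row).map pvFill) := by
  simp only []
  rw [foldA_eq_gSeg row [] 0 0, join_eq_gSeg (pvSplit row) (pvSplit_ne_nil row)]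
  simp

-- ===== VERDICT (by name: the statement is the Claim_ definition above) =====
theorem shift_block_spec : Claim_equal_shift_block := by
  intro block _
  unfold Spec_shift_block shift_block shift_block_alt
  exact List.map_congr_left (fun row _ => row_eq row)
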